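-- pv_equiv track=rewrite | github.com/omar-mahdi/discord-bot | league.py | formatRanks
-- ===== SOURCE A (Python) =====
-- def formatRanks(request):
--     # Default input is unranked in case the user doesn't have a ranked solo or ranked flex object
--     solo = 'SOLO: **Unranked**'
--     flex = 'FLEX: **Unranked**'
--
--     # Check all leagues in the object and determine if thy're solo or flex
--     for league in request:
--         if league['queueType'] == 'RANKED_FLEX_SR':
--             flex = 'FLEX: **{} {}**'.format(
--                 league['tier'], league['rank'], league['leaguePoints'])
--         elif league['queueType'] == 'RANKED_SOLO_5x5':
--             solo = 'SOLO: **{} {}**'.format(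
--                 league['tier'], league['rank'], league['leaguePoints'])
--     return solo + ' || ' + flex
-- ===== SOURCE B (Python) =====
-- def formatRanks(request):
--     # One pass: index the leagues by queueType (last wins), then format from the table.
--     by_type = {}
--     for league in request:
--         by_type[league['queueType']] = league
--
--     def fmt(label, league):
--         if league is None:
--             return label + ': **Unranked**'
--         return '{}: **{} {}**'.format(label, league['tier'], league['rank'])
--
--     return (fmt('SOLO', by_type.get('RANKED_SOLO_5x5')) + ' || '
--             + fmt('FLEX', by_type.get('RANKED_FLEX_SR')))
-- ===== Notes on version B (the rewrite author's own statement) =====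
-- stated objective: simpler
-- what changed: Replaces the two mutable string accumulators updated by in-loop if/elif branching with a single-pass queueType->league index table (last wins), from which the two strings are formatted afterward by one shared helper.
import Mathlib
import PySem

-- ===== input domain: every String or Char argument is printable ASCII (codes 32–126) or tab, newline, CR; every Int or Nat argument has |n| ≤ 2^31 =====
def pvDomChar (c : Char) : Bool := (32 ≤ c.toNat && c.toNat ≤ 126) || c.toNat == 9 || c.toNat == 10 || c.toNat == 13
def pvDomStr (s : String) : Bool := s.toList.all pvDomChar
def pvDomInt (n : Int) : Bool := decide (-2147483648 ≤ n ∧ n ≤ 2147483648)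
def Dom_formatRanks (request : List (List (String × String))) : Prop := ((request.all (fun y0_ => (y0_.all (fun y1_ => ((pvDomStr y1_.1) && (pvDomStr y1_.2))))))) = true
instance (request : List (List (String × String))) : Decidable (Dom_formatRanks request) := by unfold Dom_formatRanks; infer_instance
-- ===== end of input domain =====

-- B replaces A's in-loop if/elif updates of two string accumulators with a queueType->league
-- index dict built in one pass and consulted afterward (objective: simpler).


-- ===== PORT A =====
-- league[k] on the Python dict built from the pair list (dict subscript; "" only where Pre_ excludes the KeyError)
def pvGet (l : List (String × String)) (k : String) : String :=
  PySem.Dict.getD (PySem.Dict.ofList l) k ""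

def formatRanks (request : List (List (String × String))) : String :=
  let st := request.foldl
    (fun (acc : String × String) league =>
      if pvGet league "queueType" = "RANKED_FLEX_SR" then
        (acc.1, "FLEX: **" ++ pvGet league "tier" ++ " " ++ pvGet league "rank" ++ "**")
      else if pvGet league "queueType" = "RANKED_SOLO_5x5" then
        ("SOLO: **" ++ pvGet league "tier" ++ " " ++ pvGet league "rank" ++ "**", acc.2)
      else acc)
    ("SOLO: **Unranked**", "FLEX: **Unranked**")
  st.1 ++ " || " ++ st.2

-- ===== PORT B =====
def pvFmt (label : String) (league : Option (List (String × String))) : String :=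
  match league with
  | none => label ++ ": **Unranked**"
  | some l => label ++ ": **" ++ pvGet l "tier" ++ " " ++ pvGet l "rank" ++ "**"

def formatRanks_alt (request : List (List (String × String))) : String :=
  let byType : PySem.Dict String (List (String × String)) :=
    request.foldl (fun d league => d.insert (pvGet league "queueType") league) PySem.Dict.empty
  pvFmt "SOLO" (byType.get? "RANKED_SOLO_5x5") ++ " || " ++ pvFmt "FLEX" (byType.get? "RANKED_FLEX_SR")

-- ===== PRECONDITION & SPEC =====
-- Pre_ excludes exactly the inputs on which Python A raises KeyError: a league without a
-- 'queueType' key, or a solo/flex league missing 'tier', 'rank' or 'leaguePoints'.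
def pvHasKey (l : List (String × String)) (k : String) : Bool :=
  ((PySem.Dict.ofList l).get? k).isSome

def Pre_formatRanks (request : List (List (String × String))) : Prop :=
  ∀ league ∈ request, pvHasKey league "queueType" = true ∧
    ((pvGet league "queueType" = "RANKED_SOLO_5x5" ∨ pvGet league "queueType" = "RANKED_FLEX_SR") →
      pvHasKey league "tier" = true ∧ pvHasKey league "rank" = true ∧ pvHasKey league "leaguePoints" = true)

instance (request : List (List (String × String))) : Decidable (Pre_formatRanks request) := by
  unfold Pre_formatRanks; infer_instance

def pvWitness_formatRanks : (List (List (String × String))) :=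
  [[("queueType", "RANKED_SOLO_5x5"), ("tier", "GOLD"), ("rank", "II"), ("leaguePoints", "55")],
   [("queueType", "RANKED_TFT")]]

def Spec_formatRanks (request : List (List (String × String))) (out : String) : Prop := out = formatRanks_alt request
instance (request : List (List (String × String))) (out : String) : Decidable (Spec_formatRanks request out) := by unfold Spec_formatRanks; infer_instance

-- ===== CLAIM (what is proved, stated in full; the proofs are below) =====
def Claim_equal_formatRanks : Prop := ∀ (request : List (List (String × String))), Dom_formatRanks request → Pre_formatRanks request → Spec_formatRanks request (formatRanks request)

-- ===== LEMMAS AND PROOFS =====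

theorem pvWitness_ok : Dom_formatRanks pvWitness_formatRanks ∧ Pre_formatRanks pvWitness_formatRanks := by
  decide

theorem pvFmt_solo_some (l : List (String × String)) :
    pvFmt "SOLO" (some l) = "SOLO: **" ++ pvGet l "tier" ++ " " ++ pvGet l "rank" ++ "**" := by
  have h : ("SOLO" : String) ++ ": **" = "SOLO: **" := rfl
  simp [pvFmt, h]

theorem pvFmt_flex_some (l : List (String × String)) :
    pvFmt "FLEX" (some l) = "FLEX: **" ++ pvGet l "tier" ++ " " ++ pvGet l "rank" ++ "**" := by
  have h : ("FLEX" : String) ++ ": **" = "FLEX: **" := rfl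
  simp [pvFmt, h]

-- loop invariant: A's two accumulators are exactly the renderings of B's dict at the two keys
theorem loop_inv (request : List (List (String × String)))
    (d : PySem.Dict String (List (String × String))) (solo flex : String)
    (hs : solo = pvFmt "SOLO" (d.get? "RANKED_SOLO_5x5"))
    (hf : flex = pvFmt "FLEX" (d.get? "RANKED_FLEX_SR")) :
    request.foldl
      (fun (acc : String × String) league =>
        if pvGet league "queueType" = "RANKED_FLEX_SR" then
          (acc.1, "FLEX: **" ++ pvGet league "tier" ++ " " ++ pvGet league "rank" ++ "**")
        else if pvGet league "queueType" = "RANKED_SOLO_5x5" then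
          ("SOLO: **" ++ pvGet league "tier" ++ " " ++ pvGet league "rank" ++ "**", acc.2)
        else acc) (solo, flex)
    = (pvFmt "SOLO" ((request.foldl (fun d league => d.insert (pvGet league "queueType") league) d).get? "RANKED_SOLO_5x5"),
       pvFmt "FLEX" ((request.foldl (fun d league => d.insert (pvGet league "queueType") league) d).get? "RANKED_FLEX_SR")) := by
  induction request generalizing d solo flex with
  | nil => simp [hs, hf]
  | cons league rest ih =>
    simp only [List.foldl_cons]
    by_cases h1 : pvGet league "queueType" = "RANKED_FLEX_SR"
    · rw [if_pos h1]
      apply ih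
      · rw [hs, PySem.Dict.get?_insert]
        rw [if_neg (by rw [h1]; decide)]
      · rw [h1, PySem.Dict.get?_insert, if_pos rfl, pvFmt_flex_some]
    · rw [if_neg h1]
      by_cases h2 : pvGet league "queueType" = "RANKED_SOLO_5x5"
      · rw [if_pos h2]
        apply ih
        · rw [h2, PySem.Dict.get?_insert, if_pos rfl, pvFmt_solo_some]
        · rw [hf, PySem.Dict.get?_insert]
          rw [if_neg (by rw [h2]; decide)]
      · rw [if_neg h2]
        apply ih
        · rw [hs, PySem.Dict.get?_insert, if_neg (fun h => h2 h.symm)]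
        · rw [hf, PySem.Dict.get?_insert, if_neg (fun h => h1 h.symm)]

-- ===== VERDICT (by name: the statement is the Claim_ definition above) =====
theorem formatRanks_spec : Claim_equal_formatRanks := by
  intro request _ _
  unfold Spec_formatRanks formatRanks formatRanks_alt
  rw [loop_inv request PySem.Dict.empty _ _ (by rfl) (by rfl)]
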